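-- pv_equiv track=rewrite | github.com/isathish/pyeval | pyeval/nlp/__init__.py | _synonym_match
-- ===== SOURCE A (Python) =====
-- from typing import List, Dict, Tuple, Optional, Union, Set
--
-- def _synonym_match(ref_tokens: List[str], cand_tokens: List[str],
--                    ref_matched: Set[int], cand_matched: Set[int]) -> Tuple[Set[int], Set[int]]:
--     """
--     Find synonym matches (simplified - uses word similarity).
--
--     Note: Full implementation would require a WordNet-like resource.
--     This is a simplified version using basic word similarity.
--     """
--     # Simple synonyms dictionary (expandable)
--     SYNONYMS = {
--         'good': {'great', 'excellent', 'fine', 'nice'},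
--         'bad': {'poor', 'terrible', 'awful'},
--         'big': {'large', 'huge', 'enormous'},
--         'small': {'tiny', 'little', 'mini'},
--         'fast': {'quick', 'rapid', 'swift'},
--         'slow': {'sluggish', 'gradual'},
--         'happy': {'glad', 'joyful', 'pleased'},
--         'sad': {'unhappy', 'sorrowful', 'gloomy'},
--         'start': {'begin', 'commence'},
--         'end': {'finish', 'conclude', 'stop'},
--         'see': {'view', 'watch', 'observe'},
--         'say': {'tell', 'speak', 'talk'},
--     }
--
--     def are_synonyms(w1: str, w2: str) -> bool:
--         w1, w2 = w1.lower(), w2.lower()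
--         if w1 == w2:
--             return True
--         for base, syns in SYNONYMS.items():
--             words = {base} | syns
--             if w1 in words and w2 in words:
--                 return True
--         return False
--
--     ref_remaining = {i: ref_tokens[i] for i in range(len(ref_tokens)) if i not in ref_matched}
--
--     for i, cand_tok in enumerate(cand_tokens):
--         if i in cand_matched:
--             continue
--
--         for j, ref_tok in list(ref_remaining.items()):
--             if are_synonyms(cand_tok, ref_tok):
--                 cand_matched.add(i)
--                 ref_matched.add(j)
--                 del ref_remaining[j]
--                 break
--
--     return ref_matched, cand_matched
-- ===== SOURCE B (Python) =====
-- from typing import List, Set, Tuple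
--
-- # B: staged group-zip-sort instead of A's per-candidate scan of remaining references.
-- # Each word is mapped once to a canonical group key (the synonym groups are pairwise
-- # disjoint); the unmatched reference and candidate indices are bucketed per key, each
-- # key's ascending lists are zipped (i-th candidate of a key takes the i-th smallest
-- # remaining reference of that key), and the resulting pairs are applied in candidate
-- # order.  Note: like A, this mutates ref_matched / cand_matched in place.
--
-- _SYNONYMS = {
--     'good': ('great', 'excellent', 'fine', 'nice'),
--     'bad': ('poor', 'terrible', 'awful'),
--     'big': ('large', 'huge', 'enormous'),
--     'small': ('tiny', 'little', 'mini'),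
--     'fast': ('quick', 'rapid', 'swift'),
--     'slow': ('sluggish', 'gradual'),
--     'happy': ('glad', 'joyful', 'pleased'),
--     'sad': ('unhappy', 'sorrowful', 'gloomy'),
--     'start': ('begin', 'commence'),
--     'end': ('finish', 'conclude', 'stop'),
--     'see': ('view', 'watch', 'observe'),
--     'say': ('tell', 'speak', 'talk'),
-- }
--
-- _GROUP_OF = {}
-- for _base, _syns in _SYNONYMS.items():
--     _GROUP_OF[_base] = _base
--     for _w in _syns:
--         _GROUP_OF[_w] = _base
--
--
-- def _key(word: str) -> str:
--     w = word.lower()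
--     return _GROUP_OF.get(w, w)
--
--
-- def _group_unmatched(tokens, matched):
--     groups = {}
--     for idx, w in enumerate(tokens):
--         if idx not in matched:
--             groups.setdefault(_key(w), []).append(idx)
--     return groups
--
--
-- def _synonym_match(ref_tokens: List[str], cand_tokens: List[str],
--                    ref_matched: Set[int], cand_matched: Set[int]) -> Tuple[Set[int], Set[int]]:
--     ref_by_key = _group_unmatched(ref_tokens, ref_matched)
--     cand_by_key = _group_unmatched(cand_tokens, cand_matched)
--     pairs = []
--     for k, cs in cand_by_key.items():
--         pairs.extend(zip(cs, ref_by_key.get(k, [])))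
--     pairs.sort(key=lambda p: p[0])
--     for i, j in pairs:
--         cand_matched.add(i)
--         ref_matched.add(j)
--     return ref_matched, cand_matched
-- ===== Notes on version B (the rewrite author's own statement) =====
-- stated objective: faster
-- what changed: B maps each word once to a canonical group key (the synonym groups are pairwise disjoint), buckets the unmatched reference and candidate indices per key, zips each key's two ascending index lists, and applies the pairs sorted by candidate index - replacing A's per-candidate linear scan of the remaining references with a per-pair scan of the synonym table.
import Mathlib
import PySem

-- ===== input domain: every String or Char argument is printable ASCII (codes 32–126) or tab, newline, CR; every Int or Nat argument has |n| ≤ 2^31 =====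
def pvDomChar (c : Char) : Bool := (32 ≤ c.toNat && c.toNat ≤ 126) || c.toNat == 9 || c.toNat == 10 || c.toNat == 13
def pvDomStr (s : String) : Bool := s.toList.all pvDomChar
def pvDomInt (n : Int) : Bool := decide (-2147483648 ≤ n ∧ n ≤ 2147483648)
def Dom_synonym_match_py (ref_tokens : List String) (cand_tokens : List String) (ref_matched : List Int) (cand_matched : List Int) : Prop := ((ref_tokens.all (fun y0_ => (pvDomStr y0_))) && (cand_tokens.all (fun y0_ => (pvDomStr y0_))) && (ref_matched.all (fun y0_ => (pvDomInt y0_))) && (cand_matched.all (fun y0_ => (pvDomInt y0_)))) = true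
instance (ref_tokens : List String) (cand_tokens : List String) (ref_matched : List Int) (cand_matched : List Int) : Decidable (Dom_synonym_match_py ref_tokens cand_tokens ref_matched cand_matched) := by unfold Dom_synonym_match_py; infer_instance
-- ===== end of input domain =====

-- B replaces A's per-candidate scan of the remaining references by a staged pipeline: one
-- word→group-key map, per-key buckets of unmatched reference and candidate indices, a zip of
-- each key's two ascending lists, and the pairs applied sorted by candidate index; both ports
-- are about the RETURN value (the Python versions also mutate ref_matched/cand_matched in
-- place, identically).

-- ===== PORT A =====
def pvSynonymsA : PySem.Dict String (PySem.Set String) := PySem.Dict.ofList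
  [ ("good",  PySem.Set.ofList ["great", "excellent", "fine", "nice"])
  , ("bad",   PySem.Set.ofList ["poor", "terrible", "awful"])
  , ("big",   PySem.Set.ofList ["large", "huge", "enormous"])
  , ("small", PySem.Set.ofList ["tiny", "little", "mini"])
  , ("fast",  PySem.Set.ofList ["quick", "rapid", "swift"])
  , ("slow",  PySem.Set.ofList ["sluggish", "gradual"])
  , ("happy", PySem.Set.ofList ["glad", "joyful", "pleased"])
  , ("sad",   PySem.Set.ofList ["unhappy", "sorrowful", "gloomy"])
  , ("start", PySem.Set.ofList ["begin", "commence"])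
  , ("end",   PySem.Set.ofList ["finish", "conclude", "stop"])
  , ("see",   PySem.Set.ofList ["view", "watch", "observe"])
  , ("say",   PySem.Set.ofList ["tell", "speak", "talk"]) ]

-- words = {base} | syns
def pvWordsOf (g : String × PySem.Set String) : PySem.Set String :=
  PySem.Set.union (PySem.Set.ofList [g.1]) g.2

def pvAreSynonyms (w1 w2 : String) : Bool :=
  let l1 := PySem.Str.lower w1
  let l2 := PySem.Str.lower w2
  if l1 == l2 then true
  else pvSynonymsA.items.any (fun g =>
    PySem.Set.contains (pvWordsOf g) l1 && PySem.Set.contains (pvWordsOf g) l2)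

-- the 'for i, cand_tok in enumerate(cand_tokens)' loop of A (inner loop-with-break = find?)
def pvALoop : List (Int × String) → PySem.Set Int → PySem.Set Int → PySem.Dict Int String →
    PySem.Set Int × PySem.Set Int
  | [], refM, candM, _ => (refM, candM)
  | (i, tok) :: rest, refM, candM, rem =>
    if PySem.Set.contains candM i then pvALoop rest refM candM rem
    else
      match rem.items.find? (fun p => pvAreSynonyms tok p.2) with
      | some (j, _) =>
          pvALoop rest (PySem.Set.add refM j) (PySem.Set.add candM i) (rem.erase j)
      | none => pvALoop rest refM candM rem

def synonym_match_py (ref_tokens : List String) (cand_tokens : List String) (ref_matched : List Int) (cand_matched : List Int) : List Int × List Int :=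
  let ref_remaining : PySem.Dict Int String :=
    (PySem.List.pyRange 0 (ref_tokens.length : Int) 1).foldl
      (fun d i => if PySem.Set.contains ref_matched i then d
                  else d.insert i (PySem.List.pyGetD ref_tokens i ""))
      PySem.Dict.empty
  pvALoop (PySem.List.enumerate cand_tokens 0) ref_matched cand_matched ref_remaining

-- ===== PORT B =====
def pvSynonymsB : List (String × List String) :=
  [ ("good",  ["great", "excellent", "fine", "nice"])
  , ("bad",   ["poor", "terrible", "awful"])
  , ("big",   ["large", "huge", "enormous"])
  , ("small", ["tiny", "little", "mini"])
  , ("fast",  ["quick", "rapid", "swift"])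
  , ("slow",  ["sluggish", "gradual"])
  , ("happy", ["glad", "joyful", "pleased"])
  , ("sad",   ["unhappy", "sorrowful", "gloomy"])
  , ("start", ["begin", "commence"])
  , ("end",   ["finish", "conclude", "stop"])
  , ("see",   ["view", "watch", "observe"])
  , ("say",   ["tell", "speak", "talk"]) ]

-- _GROUP_OF: word -> canonical group key
def pvGroupOf : PySem.Dict String String :=
  pvSynonymsB.foldl
    (fun d g => g.2.foldl (fun d w => d.insert w g.1) (d.insert g.1 g.1))
    PySem.Dict.empty

def pvKey (word : String) : String :=
  let w := PySem.Str.lower word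
  pvGroupOf.getD w w

-- _group_unmatched: per-key ascending buckets of the still-unmatched token indices
def pvGroup (tokens : List String) (matched : List Int) : PySem.Dict String (List Int) :=
  (PySem.List.enumerate tokens 0).foldl
    (fun d p => if PySem.Set.contains matched p.1 then d
                else d.modify (pvKey p.2) [] (· ++ [p.1]))
    PySem.Dict.empty

def synonym_match_py_alt (ref_tokens : List String) (cand_tokens : List String) (ref_matched : List Int) (cand_matched : List Int) : List Int × List Int :=
  let refBy := pvGroup ref_tokens ref_matched
  let candBy := pvGroup cand_tokens cand_matched
  let pairs := candBy.items.foldl (fun acc p => acc ++ p.2.zip (refBy.getD p.1 [])) []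
  let sortedPairs := PySem.List.sorted pairs (fun p => p.1) false
  sortedPairs.foldl (fun s p => (PySem.Set.add s.1 p.2, PySem.Set.add s.2 p.1))
    (ref_matched, cand_matched)

-- ===== PRECONDITION & SPEC =====
def Spec_synonym_match_py (ref_tokens : List String) (cand_tokens : List String) (ref_matched : List Int) (cand_matched : List Int) (out : List Int × List Int) : Prop := out = synonym_match_py_alt ref_tokens cand_tokens ref_matched cand_matched
instance (ref_tokens : List String) (cand_tokens : List String) (ref_matched : List Int) (cand_matched : List Int) (out : List Int × List Int) : Decidable (Spec_synonym_match_py ref_tokens cand_tokens ref_matched cand_matched out) := by unfold Spec_synonym_match_py; infer_instance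

-- ===== CLAIM (what is proved, stated in full; the proofs are below) =====
def Claim_equal_synonym_match_py : Prop := ∀ (ref_tokens : List String) (cand_tokens : List String) (ref_matched : List Int) (cand_matched : List Int), Dom_synonym_match_py ref_tokens cand_tokens ref_matched cand_matched → Spec_synonym_match_py ref_tokens cand_tokens ref_matched cand_matched (synonym_match_py ref_tokens cand_tokens ref_matched cand_matched)

-- ===== LEMMAS AND PROOFS =====

-- find-first-with-break is the head of the filtered list
theorem pv_find?_eq_head?_filter {α : Type} (p : α → Bool) (l : List α) :
    l.find? p = (l.filter p).head? := by
  induction l with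
  | nil => rfl
  | cons x t ih =>
    by_cases h : p x = true
    · rw [List.find?_cons_of_pos h, List.filter_cons_of_pos h, List.head?_cons]
    · rw [List.find?_cons_of_neg h, List.filter_cons_of_neg h, ih]

-- every word of every synonym group is mapped to that group's base
set_option maxRecDepth 8192 in
theorem pv_group_mem : ∀ g ∈ pvSynonymsA.items, ∀ l ∈ pvWordsOf g,
    (l, g.1) ∈ pvGroupOf.items := by decide

-- two words mapped to the same base lie in a common group
set_option maxRecDepth 8192 in
theorem pv_group_back : ∀ p ∈ pvGroupOf.items, ∀ q ∈ pvGroupOf.items, p.2 = q.2 →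
    pvSynonymsA.items.any (fun g =>
      PySem.Set.contains (pvWordsOf g) p.1 && PySem.Set.contains (pvWordsOf g) q.1) = true := by
  decide

-- every base is itself a key of the map
set_option maxRecDepth 8192 in
theorem pv_group_base : ∀ p ∈ pvGroupOf.items, (p.2, p.2) ∈ pvGroupOf.items := by decide

set_option maxRecDepth 8192 in
theorem pv_group_nodup : pvGroupOf.keys.Nodup := by decide

-- core word-level fact: A's synonym test is equality of B's canonical keys
theorem pv_key_core (l1 l2 : String) :
    (if l1 == l2 then true
     else pvSynonymsA.items.any (fun g =>
       PySem.Set.contains (pvWordsOf g) l1 && PySem.Set.contains (pvWordsOf g) l2))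
    = (pvGroupOf.getD l1 l1 == pvGroupOf.getD l2 l2) := by
  have hnd := pv_group_nodup
  have hany : ∀ x y : String,
      pvSynonymsA.items.any (fun g =>
        PySem.Set.contains (pvWordsOf g) x && PySem.Set.contains (pvWordsOf g) y) = true →
      ∃ b, pvGroupOf.get? x = some b ∧ pvGroupOf.get? y = some b := by
    intro x y hx
    obtain ⟨g, hg, hb⟩ := List.any_eq_true.mp hx
    obtain ⟨hcx, hcy⟩ := Bool.and_eq_true_iff.mp hb
    refine ⟨g.1, ?_, ?_⟩
    · exact (PySem.Dict.get?_eq_some_iff_mem_items _ _ _ hnd).mpr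
        (pv_group_mem g hg x ((PySem.Set.contains_iff _ _).mp hcx))
    · exact (PySem.Dict.get?_eq_some_iff_mem_items _ _ _ hnd).mpr
        (pv_group_mem g hg y ((PySem.Set.contains_iff _ _).mp hcy))
  rcases h1 : pvGroupOf.get? l1 with _ | b1 <;> rcases h2 : pvGroupOf.get? l2 with _ | b2
  · -- none / none
    rw [PySem.Dict.getD_of_get?_eq_none _ _ h1, PySem.Dict.getD_of_get?_eq_none _ _ h2]
    by_cases he : l1 = l2
    · subst he; simp
    · rw [if_neg (by simpa using he)]
      have hf : pvSynonymsA.items.any (fun g =>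
          PySem.Set.contains (pvWordsOf g) l1 && PySem.Set.contains (pvWordsOf g) l2) = false := by
        rw [Bool.eq_false_iff]
        intro hx; obtain ⟨b, hb1, _⟩ := hany _ _ hx; rw [h1] at hb1; simp at hb1
      rw [hf]; symm; exact beq_eq_false_iff_ne.mpr he
  · -- none / some
    rw [PySem.Dict.getD_of_get?_eq_none _ _ h1, PySem.Dict.getD_of_get?_eq_some _ _ h2]
    have hm2 : (l2, b2) ∈ pvGroupOf.items := (PySem.Dict.get?_eq_some_iff_mem_items _ _ _ hnd).mp h2
    have hb2 : b2 ∈ pvGroupOf.keys := PySem.Dict.mem_keys_of_mem_items _ (pv_group_base _ hm2)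
    have hne : l1 ≠ b2 := by
      intro he; exact (PySem.Dict.get?_eq_none_iff_not_mem_keys _ _).mp h1 (he ▸ hb2)
    have he : l1 ≠ l2 := by
      intro he; rw [he, h2] at h1; simp at h1
    rw [if_neg (by simpa using he)]
    have hf : pvSynonymsA.items.any (fun g =>
        PySem.Set.contains (pvWordsOf g) l1 && PySem.Set.contains (pvWordsOf g) l2) = false := by
      rw [Bool.eq_false_iff]
      intro hx; obtain ⟨b, hb1, _⟩ := hany _ _ hx; rw [h1] at hb1; simp at hb1
    rw [hf]; symm; exact beq_eq_false_iff_ne.mpr hne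
  · -- some / none
    rw [PySem.Dict.getD_of_get?_eq_some _ _ h1, PySem.Dict.getD_of_get?_eq_none _ _ h2]
    have hm1 : (l1, b1) ∈ pvGroupOf.items := (PySem.Dict.get?_eq_some_iff_mem_items _ _ _ hnd).mp h1
    have hb1 : b1 ∈ pvGroupOf.keys := PySem.Dict.mem_keys_of_mem_items _ (pv_group_base _ hm1)
    have hne : b1 ≠ l2 := by
      intro he; exact (PySem.Dict.get?_eq_none_iff_not_mem_keys _ _).mp h2 (he ▸ hb1)
    have he : l1 ≠ l2 := by
      intro he; rw [← he, h1] at h2; simp at h2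
    rw [if_neg (by simpa using he)]
    have hf : pvSynonymsA.items.any (fun g =>
        PySem.Set.contains (pvWordsOf g) l1 && PySem.Set.contains (pvWordsOf g) l2) = false := by
      rw [Bool.eq_false_iff]
      intro hx; obtain ⟨b, _, hb2'⟩ := hany _ _ hx; rw [h2] at hb2'; simp at hb2'
    rw [hf]; symm; exact beq_eq_false_iff_ne.mpr hne
  · -- some / some
    rw [PySem.Dict.getD_of_get?_eq_some _ _ h1, PySem.Dict.getD_of_get?_eq_some _ _ h2]
    have hm1 : (l1, b1) ∈ pvGroupOf.items := (PySem.Dict.get?_eq_some_iff_mem_items _ _ _ hnd).mp h1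
    have hm2 : (l2, b2) ∈ pvGroupOf.items := (PySem.Dict.get?_eq_some_iff_mem_items _ _ _ hnd).mp h2
    by_cases hb : b1 = b2
    · have hback : pvSynonymsA.items.any (fun g =>
          PySem.Set.contains (pvWordsOf g) l1 && PySem.Set.contains (pvWordsOf g) l2) = true :=
        pv_group_back (l1, b1) hm1 (l2, b2) hm2 hb
      subst hb
      by_cases he : l1 = l2
      · subst he; simp
      · rw [if_neg (by simpa using he), hback]; symm; exact beq_self_eq_true b1
    · have he : l1 ≠ l2 := by
        intro he; rw [he, h2] at h1; exact hb (Option.some.inj h1).symm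
      rw [if_neg (by simpa using he)]
      have hf : pvSynonymsA.items.any (fun g =>
          PySem.Set.contains (pvWordsOf g) l1 && PySem.Set.contains (pvWordsOf g) l2) = false := by
        rw [Bool.eq_false_iff]
        intro hx
        obtain ⟨b, hb1', hb2'⟩ := hany _ _ hx
        rw [h1] at hb1'; rw [h2] at hb2'
        exact hb ((Option.some.inj hb1').trans (Option.some.inj hb2').symm)
      rw [hf]; symm; exact beq_eq_false_iff_ne.mpr hb

theorem pv_syn_eq_key (w1 w2 : String) :
    pvAreSynonyms w1 w2 = (pvKey w1 == pvKey w2) := by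
  simpa [pvAreSynonyms, pvKey] using
    pv_key_core (PySem.Str.lower w1) (PySem.Str.lower w2)

theorem pv_beq_comm (a b : String) : (a == b) = (b == a) := by
  by_cases h : a = b
  · simp [h]
  · simp [h, Ne.symm h]

-- in a list with unique keys, a pair is determined by its key
theorem pv_key_unique {l : List (Int × String)} (hnd : (l.map Prod.fst).Nodup)
    {p q : Int × String} (hp : p ∈ l) (hq : q ∈ l) (h : p.1 = q.1) : p = q :=
  List.inj_on_of_nodup_map hnd hp hq h

-- the greedy pair sequence (reference abstraction shared by both proofs)
def pvPairs : List (Int × String) → PySem.Set Int → PySem.Dict String (List Int) →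
    List (Int × Int)
  | [], _, _ => []
  | (i, tok) :: rest, candM, b =>
    if PySem.Set.contains candM i then pvPairs rest candM b
    else
      match b.getD (pvKey tok) [] with
      | [] => pvPairs rest candM b
      | j :: rs => (i, j) :: pvPairs rest (PySem.Set.add candM i) (b.insert (pvKey tok) rs)

def pvStep (s : PySem.Set Int × PySem.Set Int) (p : Int × Int) :
    PySem.Set Int × PySem.Set Int :=
  (PySem.Set.add s.1 p.2, PySem.Set.add s.2 p.1)

-- invariant tying A's remaining-dict to the per-key buckets
def pvInv (rem : PySem.Dict Int String) (b : PySem.Dict String (List Int)) : Prop :=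
  rem.keys.Nodup ∧
  ∀ k, b.getD k [] = (rem.items.filter (fun p => pvKey p.2 == k)).map (fun p => p.1)

theorem pv_aloop_eq (cl : List (Int × String)) (refM candM : PySem.Set Int)
    (rem : PySem.Dict Int String) (b : PySem.Dict String (List Int))
    (h : pvInv rem b) :
    pvALoop cl refM candM rem = (pvPairs cl candM b).foldl pvStep (refM, candM) := by
  induction cl generalizing refM candM rem b with
  | nil => rfl
  | cons p rest ih =>
    obtain ⟨i, tok⟩ := p
    obtain ⟨hnd, hbk⟩ := h
    simp only [pvALoop, pvPairs]
    by_cases hc : PySem.Set.contains candM i = true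
    · rw [if_pos hc, if_pos hc]; exact ih _ _ _ _ ⟨hnd, hbk⟩
    · rw [if_neg hc, if_neg hc]
      have hpred : (fun p : Int × String => pvAreSynonyms tok p.2)
          = (fun p : Int × String => pvKey p.2 == pvKey tok) :=
        funext fun p => by rw [pv_syn_eq_key, pv_beq_comm]
      rw [hpred]
      have hhead := pv_find?_eq_head?_filter
        (fun p : Int × String => pvKey p.2 == pvKey tok) rem.items
      rcases hf : rem.items.find? (fun p : Int × String => pvKey p.2 == pvKey tok)
        with _ | ⟨j, w⟩
      · -- no synonym among the remaining references: the bucket is empty too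
        have hfil : rem.items.filter (fun p : Int × String => pvKey p.2 == pvKey tok) = [] := by
          rw [hf] at hhead
          cases hx : rem.items.filter (fun p : Int × String => pvKey p.2 == pvKey tok) with
          | nil => rfl
          | cons a t => rw [hx] at hhead; simp at hhead
        rw [hbk (pvKey tok), hfil]
        simp only [List.map_nil]
        exact ih _ _ _ _ ⟨hnd, hbk⟩
      · -- first matching pair (j, w): the bucket's head is exactly j
        have hfil : ∃ t, rem.items.filter (fun p : Int × String => pvKey p.2 == pvKey tok)
            = (j, w) :: t := by
          rw [hf] at hhead
          cases hx : rem.items.filter (fun p : Int × String => pvKey p.2 == pvKey tok) with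
          | nil => rw [hx] at hhead; simp at hhead
          | cons a t =>
            rw [hx] at hhead
            exact ⟨t, by rw [List.head?_cons] at hhead; rw [(Option.some.inj hhead).symm]⟩
        obtain ⟨t, hfil⟩ := hfil
        have hjw_mem : (j, w) ∈ rem.items := List.mem_of_find?_eq_some hf
        have hjw_key : pvKey w = pvKey tok := by
          have := List.find?_some hf
          simpa using this
        have hnd_fil : (((rem.items.filter
            (fun p : Int × String => pvKey p.2 == pvKey tok)).map Prod.fst)).Nodup :=
          List.Nodup.sublist (List.Sublist.map Prod.fst List.filter_sublist) hnd
        have hj_not_t : ∀ q ∈ t, q.1 ≠ j := by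
          intro q hq hqj
          rw [hfil] at hnd_fil
          simp only [List.map_cons, List.nodup_cons] at hnd_fil
          exact hnd_fil.1 (hqj ▸ List.mem_map_of_mem hq)
        rw [hbk (pvKey tok), hfil]
        simp only [List.map_cons, List.foldl_cons]
        -- both sides matched candidate i against reference j; re-establish the invariant
        apply ih
        constructor
        · have : (rem.erase j).items = rem.items.filter (fun p => !(p.1 == j)) := rfl
          rw [PySem.Dict.keys, this]
          exact List.Nodup.sublist (List.Sublist.map Prod.fst List.filter_sublist) hnd
        · intro k
          have herase : (rem.erase j).items = rem.items.filter (fun p => !(p.1 == j)) := rfl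
          rw [PySem.Dict.getD_insert, herase,
              List.filter_comm (fun p : Int × String => pvKey p.2 == k) (fun p => !(p.1 == j))]
          by_cases hk : k = pvKey tok
          · rw [if_pos hk, hk, hfil]
            have hhd : (!((j, w).1 == j)) = false := by simp
            rw [List.filter_cons, hhd]
            simp only [Bool.false_eq_true, if_false]
            rw [List.filter_eq_self.mpr (fun q hq => by simpa using hj_not_t q hq)]
          · rw [if_neg hk, hbk k]
            have hself : List.filter (fun p => !(p.1 == j))
                (List.filter (fun p : Int × String => pvKey p.2 == k) rem.items)
                = List.filter (fun p : Int × String => pvKey p.2 == k) rem.items := by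
              apply List.filter_eq_self.mpr
              intro q hq
              rw [List.mem_filter] at hq
              obtain ⟨hqmem, hqkey⟩ := hq
              simp only [Bool.not_eq_eq_eq_not, Bool.not_true, beq_eq_false_iff_ne]
              intro hqj
              have hqe : q = (j, w) := pv_key_unique hnd hqmem hjw_mem hqj
              rw [hqe] at hqkey
              simp only [beq_iff_eq] at hqkey
              exact hk (hqkey.symm.trans hjw_key)
            rw [hself]

-- closed forms over a token/index pair list (cl plays the role of enumerate(tokens))
def pvCsL (cl : List (Int × String)) (m : List Int) (k : String) : List Int :=
  (cl.filter (fun p => !(PySem.Set.contains m p.1) && (pvKey p.2 == k))).map (fun p => p.1)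

def pvKeysL (cl : List (Int × String)) (m : List Int) : List String :=
  PySem.Set.ofList ((cl.filter (fun p => !(PySem.Set.contains m p.1))).map (fun p => pvKey p.2))

-- the contribution of one key: that key's candidate bucket zipped with its reference bucket
def pvZ (m : List Int) (b : PySem.Dict String (List Int)) (cl : List (Int × String))
    (x : String) : List (Int × Int) :=
  (pvCsL cl m x).zip (b.getD x [])

def pvFlat (cl : List (Int × String)) (m : List Int) (b : PySem.Dict String (List Int)) :
    List (Int × Int) :=
  ((pvKeysL cl m).map (pvZ m b cl)).flatten

theorem pv_guard_shape (m : List Int) :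
    (fun (d : PySem.Dict String (List Int)) (p : Int × String) =>
      if PySem.Set.contains m p.1 then d else d.modify (pvKey p.2) [] (· ++ [p.1]))
    = (fun d p => if ¬ (PySem.Set.contains m p.1 = true)
        then d.modify (pvKey p.2) [] (· ++ [p.1]) else d) := by
  funext d p
  by_cases h : PySem.Set.contains m p.1 = true
  · rw [if_pos h, if_neg (not_not_intro h)]
  · rw [if_neg h, if_pos h]

theorem pv_getD_empty {κ ν : Type} [BEq κ] (k : κ) (d0 : ν) :
    (PySem.Dict.empty : PySem.Dict κ ν).getD k d0 = d0 := rfl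

theorem pv_update_nil_eq_ofList {α : Type} [BEq α] (l : List α) :
    PySem.Set.update ((PySem.Dict.empty : PySem.Dict α (List Int)).keys) l
      = PySem.Set.ofList l := rfl

theorem pv_fold_pairs (l : List (Int × String)) (d : PySem.Dict String (List Int)) :
    l.foldl (fun d p => d.modify (pvKey p.2) [] (· ++ [p.1])) d
    = (l.map (fun p => (pvKey p.2, p.1))).foldl (fun d q => d.modify q.1 [] (· ++ [q.2])) d := by
  rw [List.foldl_map]

theorem pv_group_getD (tokens : List String) (m : List Int) (k : String) :
    (pvGroup tokens m).getD k [] = pvCsL (PySem.List.enumerate tokens 0) m k := by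
  unfold pvGroup
  rw [pv_guard_shape m, PySem.List.foldl_ite_eq_foldl_filter, pv_fold_pairs,
    PySem.Dict.getD_foldl_modify_append]
  simp only [pvCsL, List.filter_map, List.map_map, List.filter_filter]
  rw [pv_getD_empty]
  simp only [List.nil_append]
  have hfun : ((fun (x : String × Int) => x.2) ∘ fun (p : Int × String) => (pvKey p.2, p.1))
      = (fun (p : Int × String) => p.1) := rfl
  rw [hfun]
  refine congrArg _ (List.filter_congr (fun p _ => ?_))
  cases hcp : PySem.Set.contains m p.1
  · have hnotin : p.1 ∉ m := by simpa using hcp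
    simp [hnotin]
  · have hin : p.1 ∈ m := by simpa using hcp
    simp [hin]

theorem pv_group_keys (tokens : List String) (m : List Int) :
    (pvGroup tokens m).keys = pvKeysL (PySem.List.enumerate tokens 0) m := by
  unfold pvGroup pvKeysL
  rw [pv_guard_shape m, PySem.List.foldl_ite_eq_foldl_filter,
    PySem.Dict.keys_foldl_modify_key _ (fun p : Int × String => pvKey p.2) []
      (fun _ p => (· ++ [p.1])) PySem.Dict.empty]
  rw [pv_update_nil_eq_ofList]
  congr 2
  apply List.filter_congr
  intro p _
  simp

theorem pv_items_eq {κ ν : Type} [BEq κ] [LawfulBEq κ] (d : PySem.Dict κ ν) (dflt : ν)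
    (h : d.keys.Nodup) : d.items = d.keys.map (fun k => (k, d.getD k dflt)) := by
  conv_lhs => rw [← List.map_id d.items]
  rw [PySem.Dict.keys, List.map_map]
  apply List.map_congr_left
  intro p hp
  have : d.get? p.1 = some p.2 :=
    (PySem.Dict.get?_eq_some_iff_mem_items d p.1 p.2 h).mpr (by simpa using hp)
  simp [Function.comp, PySem.Dict.getD_of_get?_eq_some d dflt this]

theorem pv_init_inv (ref_tokens : List String) (ref_matched : List Int) :
    pvInv
      ((PySem.List.pyRange 0 (ref_tokens.length : Int) 1).foldl
        (fun d i => if PySem.Set.contains ref_matched i then d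
                    else d.insert i (PySem.List.pyGetD ref_tokens i ""))
        PySem.Dict.empty)
      (pvGroup ref_tokens ref_matched) := by
  have hite : ∀ {β : Type} (f : β → Int → β) (d0 : β) (l : List Int),
      l.foldl (fun d i => if PySem.Set.contains ref_matched i then d else f d i) d0
      = (l.filter (fun i => !(PySem.Set.contains ref_matched i))).foldl f d0 := by
    intro β f d0 l
    have h1 : (fun (d : β) (i : Int) => if PySem.Set.contains ref_matched i then d else f d i)
        = (fun d i => if ¬ (PySem.Set.contains ref_matched i = true) then f d i else d) := by
      funext d i
      cases h : PySem.Set.contains ref_matched i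
      · simp
      · simp
    rw [h1, PySem.List.foldl_ite_eq_foldl_filter]
    congr 1
    apply List.filter_congr; intro i _; simp
  have hF : ((PySem.List.pyRange 0 (ref_tokens.length : Int) 1).filter
      (fun i => !(PySem.Set.contains ref_matched i))).Nodup :=
    (PySem.List.nodup_pyRange_one _ _).filter _
  have hitems : ((PySem.List.pyRange 0 (ref_tokens.length : Int) 1).foldl
        (fun d i => if PySem.Set.contains ref_matched i then d
                    else d.insert i (PySem.List.pyGetD ref_tokens i ""))
        PySem.Dict.empty).items
      = ((PySem.List.pyRange 0 (ref_tokens.length : Int) 1).filter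
          (fun i => !(PySem.Set.contains ref_matched i))).map
            (fun i => (i, PySem.List.pyGetD ref_tokens i "")) := by
    rw [hite]
    rw [PySem.Dict.items_foldl_insert_fresh _ (fun i => i)
        (fun i => PySem.List.pyGetD ref_tokens i "") PySem.Dict.empty
        (fun a _ => PySem.Dict.contains_empty a) (by simpa using hF)]
    rfl
  constructor
  · rw [PySem.Dict.keys, hitems, List.map_map]
    simpa [Function.comp_def] using hF
  · intro k
    rw [pv_group_getD, hitems]
    simp only [pvCsL, PySem.List.enumerate_eq_map_pyRange ref_tokens "", PySem.List.len_eq,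
      List.filter_map, List.map_map, List.filter_filter]
    refine congrArg _ (List.filter_congr (fun j _ => ?_))
    cases hc : PySem.Set.contains ref_matched j
    · have hnot : j ∉ ref_matched := by simpa using hc
      simp [hnot]
    · have hin : j ∈ ref_matched := by simpa using hc
      simp [hin]

theorem pv_foldl_append_zip {α β : Type} (f : α → List β) (L : List α) :
    L.foldl (fun acc p => acc ++ f p) [] = [] ++ (L.map f).flatten := by
  rw [← PySem.List.foldl_append_eq_flatten, List.foldl_map]

theorem pv_pairs_fst_mem (cl : List (Int × String)) (candM : PySem.Set Int)
    (b : PySem.Dict String (List Int)) (p : Int × Int) (h : p ∈ pvPairs cl candM b) :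
    p.1 ∈ cl.map (fun q => q.1) := by
  induction cl generalizing candM b with
  | nil => simp [pvPairs] at h
  | cons q rest ih =>
    obtain ⟨i, tok⟩ := q
    simp only [pvPairs] at h
    simp only [List.map_cons]
    by_cases hc : PySem.Set.contains candM i = true
    · rw [if_pos hc] at h; exact List.mem_cons_of_mem _ (ih _ _ h)
    · rw [if_neg hc] at h
      cases hb : PySem.Dict.getD b (pvKey tok) [] with
      | nil => rw [hb] at h; exact List.mem_cons_of_mem _ (ih _ _ h)
      | cons j rs =>
        rw [hb] at h
        rcases List.mem_cons.mp h with he | h'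
        · simp [he]
        · exact List.mem_cons_of_mem _ (ih _ _ h')

theorem pv_pairs_pairwise (cl : List (Int × String)) (candM : PySem.Set Int)
    (b : PySem.Dict String (List Int)) (h : cl.Pairwise (fun p q => p.1 < q.1)) :
    (pvPairs cl candM b).Pairwise (fun p q => p.1 < q.1) := by
  induction cl generalizing candM b with
  | nil => simp [pvPairs]
  | cons q rest ih =>
    obtain ⟨i, tok⟩ := q
    obtain ⟨hhd, htl⟩ := List.pairwise_cons.mp h
    simp only [pvPairs]
    by_cases hc : PySem.Set.contains candM i = true
    · rw [if_pos hc]; exact ih _ _ htl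
    · rw [if_neg hc]
      cases hb : PySem.Dict.getD b (pvKey tok) [] with
      | nil => exact ih _ _ htl
      | cons j rs =>
        refine List.Pairwise.cons ?_ (ih _ _ htl)
        intro a ha
        obtain ⟨r, hr, hre⟩ := List.mem_map.mp (pv_pairs_fst_mem _ _ _ _ ha)
        have := hhd r hr
        simpa [← hre] using this

theorem pv_contains_add_ne (s : PySem.Set Int) (x y : Int) (h : y ≠ x) :
    PySem.Set.contains (PySem.Set.add s x) y = PySem.Set.contains s y := by
  cases hcy : PySem.Set.contains s y
  · have hno : ¬ (PySem.Set.contains (PySem.Set.add s x) y = true) := fun hh => by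
      rcases (PySem.Set.mem_add s x y).mp ((PySem.Set.contains_iff _ _).mp hh) with h1 | h2
      · rw [(PySem.Set.contains_iff s y).mpr h1] at hcy; simp at hcy
      · exact h h2
    exact Bool.eq_false_iff.mpr hno
  · exact (PySem.Set.contains_iff _ _).mpr
      ((PySem.Set.mem_add s x y).mpr (Or.inl ((PySem.Set.contains_iff s y).mp hcy)))

theorem pv_keysl_nodup (l : List (Int × String)) (m : List Int) : (pvKeysL l m).Nodup := by
  unfold pvKeysL; exact PySem.Set.nodup_ofList _

theorem pv_csl_cons_skip (i : Int) (tok : String) (rest : List (Int × String)) (m : List Int)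
    (k' : String) (hc : PySem.Set.contains m i = true) :
    pvCsL ((i, tok) :: rest) m k' = pvCsL rest m k' := by
  have him : i ∈ m := (PySem.Set.contains_iff m i).mp hc
  simp [pvCsL, him]

theorem pv_keysl_cons_skip (i : Int) (tok : String) (rest : List (Int × String)) (m : List Int)
    (hc : PySem.Set.contains m i = true) :
    pvKeysL ((i, tok) :: rest) m = pvKeysL rest m := by
  have him : i ∈ m := (PySem.Set.contains_iff m i).mp hc
  simp [pvKeysL, him]

theorem pv_csl_cons_self (i : Int) (tok : String) (rest : List (Int × String)) (m : List Int)
    (hcf : PySem.Set.contains m i = false) :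
    pvCsL ((i, tok) :: rest) m (pvKey tok) = i :: pvCsL rest m (pvKey tok) := by
  have hnotin : i ∉ m := by simpa using hcf
  simp [pvCsL, hnotin]

theorem pv_csl_cons_ne (i : Int) (tok : String) (rest : List (Int × String)) (m : List Int)
    (k' : String) (hcf : PySem.Set.contains m i = false) (hne : k' ≠ pvKey tok) :
    pvCsL ((i, tok) :: rest) m k' = pvCsL rest m k' := by
  have hnotin : i ∉ m := by simpa using hcf
  simp [pvCsL, hnotin, beq_eq_false_iff_ne.mpr (Ne.symm hne)]

theorem pv_keysl_iff (i : Int) (tok : String) (rest : List (Int × String)) (m : List Int)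
    (hcf : PySem.Set.contains m i = false) (x : String) :
    x ∈ pvKeysL ((i, tok) :: rest) m ↔ x = pvKey tok ∨ x ∈ pvKeysL rest m := by
  have hnotin : i ∉ m := by simpa using hcf
  unfold pvKeysL
  rw [PySem.Set.mem_ofList, PySem.Set.mem_ofList,
    List.filter_cons_of_pos (by simp [hnotin]), List.map_cons, List.mem_cons]

theorem pv_csl_add (rest : List (Int × String)) (m : List Int) (i : Int) (k' : String)
    (hi : i ∉ rest.map (fun p => p.1)) :
    pvCsL rest (PySem.Set.add m i) k' = pvCsL rest m k' := by
  unfold pvCsL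
  refine congrArg _ (List.filter_congr (fun p hp => ?_))
  rw [pv_contains_add_ne m i p.1 (fun he => hi (List.mem_map.mpr ⟨p, hp, he⟩))]

theorem pv_keysl_add (rest : List (Int × String)) (m : List Int) (i : Int)
    (hi : i ∉ rest.map (fun p => p.1)) :
    pvKeysL rest (PySem.Set.add m i) = pvKeysL rest m := by
  unfold pvKeysL
  refine congrArg _ (congrArg _ (List.filter_congr (fun p hp => ?_)))
  rw [pv_contains_add_ne m i p.1 (fun he => hi (List.mem_map.mpr ⟨p, hp, he⟩))]

theorem pv_csl_nil (l : List (Int × String)) (m : List Int) (k : String)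
    (hk : k ∉ pvKeysL l m) : pvCsL l m k = [] := by
  unfold pvCsL
  rw [List.map_eq_nil_iff, List.filter_eq_nil_iff]
  intro p hp hpred
  apply hk
  obtain ⟨h1, h2⟩ := Bool.and_eq_true_iff.mp hpred
  unfold pvKeysL
  rw [PySem.Set.mem_ofList]
  exact List.mem_map.mpr ⟨p, List.mem_filter.mpr ⟨hp, h1⟩, by simpa using h2⟩

theorem pv_flat_extract (K : List String) (k : String) (g : String → List (Int × Int))
    (hnil : k ∉ K → g k = []) :
    ((K.map g).flatten).Perm (g k ++ ((K.erase k).map g).flatten) := by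
  by_cases hk : k ∈ K
  · have h1 := List.Perm.flatten ((List.perm_cons_erase hk).map g)
    simpa using h1
  · rw [List.erase_of_not_mem hk, hnil hk, List.nil_append]

theorem pv_flat_perm {K K' : List String} (g : String → List (Int × Int))
    (h : K.Perm K') : ((K.map g).flatten).Perm ((K'.map g).flatten) :=
  List.Perm.flatten (h.map g)

theorem pv_erase_perm (i : Int) (tok : String) (rest : List (Int × String)) (m : List Int)
    (hcf : PySem.Set.contains m i = false) :
    ((pvKeysL ((i, tok) :: rest) m).erase (pvKey tok)).Perm
      ((pvKeysL rest m).erase (pvKey tok)) := by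
  refine (List.perm_ext_iff_of_nodup ((pv_keysl_nodup _ _).erase _)
    ((pv_keysl_nodup _ _).erase _)).mpr (fun x => ?_)
  rw [(pv_keysl_nodup ((i, tok) :: rest) m).mem_erase_iff,
    (pv_keysl_nodup rest m).mem_erase_iff, pv_keysl_iff i tok rest m hcf x]
  constructor
  · rintro ⟨hne, he | hm⟩
    · exact absurd he hne
    · exact ⟨hne, hm⟩
  · rintro ⟨hne, hm⟩
    exact ⟨hne, Or.inr hm⟩

theorem pv_pairs_perm (cl : List (Int × String)) (candM : PySem.Set Int)
    (b : PySem.Dict String (List Int)) (hnd : (cl.map (fun p => p.1)).Nodup) :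
    (pvPairs cl candM b).Perm (pvFlat cl candM b) := by
  induction cl generalizing candM b with
  | nil => simp [pvPairs, pvFlat, pvKeysL, PySem.Set.ofList]
  | cons hd rest ih =>
    obtain ⟨i, tok⟩ := hd
    simp only [List.map_cons, List.nodup_cons] at hnd
    obtain ⟨hi, hnd'⟩ := hnd
    by_cases hc : PySem.Set.contains candM i = true
    · -- candidate already matched: nothing changes
      simp only [pvPairs, if_pos hc]
      have h0 := ih candM b hnd'
      unfold pvFlat at h0 ⊢
      rw [pv_keysl_cons_skip i tok rest candM hc]
      have hZ : pvZ candM b rest = pvZ candM b ((i, tok) :: rest) :=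
        funext fun x => by unfold pvZ; rw [pv_csl_cons_skip i tok rest candM x hc]
      rw [← hZ]
      exact h0
    · have hcf : PySem.Set.contains candM i = false := by simpa using hc
      simp only [pvPairs, if_neg hc]
      cases hb : PySem.Dict.getD b (pvKey tok) [] with
      | nil =>
        -- no reference of this key remains: the candidate stays unmatched
        refine (ih candM b hnd').trans ?_
        unfold pvFlat
        have hZk1 : pvZ candM b rest (pvKey tok) = [] := by
          unfold pvZ; rw [hb, List.zip_nil_right]
        have hZk2 : pvZ candM b ((i, tok) :: rest) (pvKey tok) = [] := by
          unfold pvZ; rw [hb, List.zip_nil_right]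
        have hx1 := pv_flat_extract (pvKeysL rest candM) (pvKey tok)
          (pvZ candM b rest) (fun _ => hZk1)
        have hx2 := pv_flat_extract (pvKeysL ((i, tok) :: rest) candM) (pvKey tok)
          (pvZ candM b ((i, tok) :: rest)) (fun _ => hZk2)
        refine hx1.trans (.trans ?_ hx2.symm)
        have hmapE : ((pvKeysL rest candM).erase (pvKey tok)).map (pvZ candM b rest)
            = ((pvKeysL rest candM).erase (pvKey tok)).map (pvZ candM b ((i, tok) :: rest)) :=
          List.map_congr_left (fun x hx => by
            have hxne : x ≠ pvKey tok := ((pv_keysl_nodup rest candM).mem_erase_iff.mp hx).1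
            unfold pvZ
            rw [pv_csl_cons_ne i tok rest candM x hcf hxne])
        rw [hZk1, hZk2, hmapE]
        exact List.Perm.append_left _
          (pv_flat_perm _ (pv_erase_perm i tok rest candM hcf).symm)
      | cons j rs' =>
        -- candidate i takes the smallest remaining reference j of its key
        have hih := ih (PySem.Set.add candM i) (b.insert (pvKey tok) rs') hnd'
        unfold pvFlat at hih
        rw [pv_keysl_add rest candM i hi] at hih
        have hZadd : pvZ (PySem.Set.add candM i) (b.insert (pvKey tok) rs') rest
            = pvZ candM (b.insert (pvKey tok) rs') rest :=
          funext fun x => by unfold pvZ; rw [pv_csl_add rest candM i x hi]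
        rw [hZadd] at hih
        have hx1 := pv_flat_extract (pvKeysL rest candM) (pvKey tok)
          (pvZ candM (b.insert (pvKey tok) rs') rest) (fun hk => by
            unfold pvZ
            rw [pv_csl_nil rest candM (pvKey tok) hk, List.zip_nil_left])
        have hx2 := pv_flat_extract (pvKeysL ((i, tok) :: rest) candM) (pvKey tok)
          (pvZ candM b ((i, tok) :: rest))
          (fun hk => absurd ((pv_keysl_iff i tok rest candM hcf (pvKey tok)).mpr (Or.inl rfl)) hk)
        have hZk1 : pvZ candM (b.insert (pvKey tok) rs') rest (pvKey tok)
            = (pvCsL rest candM (pvKey tok)).zip rs' := by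
          unfold pvZ; rw [PySem.Dict.getD_insert, if_pos rfl]
        have hZk2 : pvZ candM b ((i, tok) :: rest) (pvKey tok)
            = ((i, j) : Int × Int) :: (pvCsL rest candM (pvKey tok)).zip rs' := by
          unfold pvZ
          rw [pv_csl_cons_self i tok rest candM hcf, hb, List.zip_cons_cons]
        have hmapE : ((pvKeysL rest candM).erase (pvKey tok)).map
              (pvZ candM (b.insert (pvKey tok) rs') rest)
            = ((pvKeysL rest candM).erase (pvKey tok)).map (pvZ candM b ((i, tok) :: rest)) :=
          List.map_congr_left (fun x hx => by
            have hxne : x ≠ pvKey tok := ((pv_keysl_nodup rest candM).mem_erase_iff.mp hx).1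
            unfold pvZ
            rw [PySem.Dict.getD_insert, if_neg hxne,
              pv_csl_cons_ne i tok rest candM x hcf hxne])
        unfold pvFlat
        refine (hih.cons ((i, j) : Int × Int)).trans
          ((List.Perm.cons _ hx1).trans (.trans ?_ hx2.symm))
        rw [hZk1, hZk2, hmapE]
        exact List.Perm.cons _ (List.Perm.append_left _
          (pv_flat_perm _ (pv_erase_perm i tok rest candM hcf).symm))

-- ===== VERDICT (by name: the statement is the Claim_ definition above) =====
theorem synonym_match_py_spec : Claim_equal_synonym_match_py := by
  intro ref_tokens cand_tokens ref_matched cand_matched _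
  unfold Spec_synonym_match_py synonym_match_py synonym_match_py_alt
  have hndk : (pvGroup cand_tokens cand_matched).keys.Nodup := by
    rw [pv_group_keys]; exact PySem.Set.nodup_ofList _
  have hpairs : (pvGroup cand_tokens cand_matched).items.foldl
        (fun acc p => acc ++ p.2.zip ((pvGroup ref_tokens ref_matched).getD p.1 [])) []
      = pvFlat (PySem.List.enumerate cand_tokens 0) cand_matched
          (pvGroup ref_tokens ref_matched) := by
    rw [pv_items_eq _ ([] : List Int) hndk, List.foldl_map, pv_foldl_append_zip,
      List.nil_append, pv_group_keys]
    unfold pvFlat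
    congr 1
    apply List.map_congr_left
    intro x _
    simp [pvZ, pv_group_getD]
  have hnd : ((PySem.List.enumerate cand_tokens 0).map (fun p : Int × String => p.1)).Nodup := by
    have := PySem.List.map_fst_enumerate cand_tokens 0
    simp only [this]
    exact PySem.List.nodup_pyRange_one _ _
  have hsorted : PySem.List.sorted
        ((pvGroup cand_tokens cand_matched).items.foldl
          (fun acc p => acc ++ p.2.zip ((pvGroup ref_tokens ref_matched).getD p.1 [])) [])
        (fun p : Int × Int => p.1)
      = pvPairs (PySem.List.enumerate cand_tokens 0) cand_matched
          (pvGroup ref_tokens ref_matched) := by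
    apply PySem.List.sorted_eq_of_perm_of_pairwise_lt
    · rw [hpairs]
      exact pv_pairs_perm _ _ _ hnd
    · exact pv_pairs_pairwise _ _ _ (PySem.List.pairwise_lt_enumerate cand_tokens 0)
  show pvALoop _ _ _ _ =
    List.foldl (fun s p => (PySem.Set.add s.1 p.2, PySem.Set.add s.2 p.1))
      (ref_matched, cand_matched)
      (PySem.List.sorted
        ((pvGroup cand_tokens cand_matched).items.foldl
          (fun acc p => acc ++ p.2.zip ((pvGroup ref_tokens ref_matched).getD p.1 [])) [])
        (fun p : Int × Int => p.1) false)
  rw [pv_aloop_eq _ ref_matched cand_matched _ _ (pv_init_inv ref_tokens ref_matched), hsorted]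
  rfl
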